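-- pv_equiv track=rewrite | github.com/ArmandleRoux/Codewars-Python | print_errors.py | print_errors
-- ===== SOURCE A (Python) =====
-- import string
--
-- def print_errors(s):
--     alphabet = list(string.ascii_lowercase)
--     denominator = len(s)
--     numerator = 0
--     for letter in s:
--         if letter in alphabet[13:]:
--             numerator += 1
--     return str(numerator) + "/" + str(denominator)
-- ===== SOURCE B (Python) =====
-- import string
--
-- def print_errors(s):
--     counts = {}
--     for ch in s:
--         counts[ch] = counts.get(ch, 0) + 1
--     numerator = sum(counts.get(c, 0) for c in string.ascii_lowercase[13:])
--     return str(numerator) + "/" + str(len(s))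
-- ===== Notes on version B (the rewrite author's own statement) =====
-- stated objective: faster
-- what changed: B builds a character frequency table in one pass and then sums the tabulated counts over the 13 target letters n-z, instead of scanning s and testing each character for membership in the sliced alphabet list.
import Mathlib
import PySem

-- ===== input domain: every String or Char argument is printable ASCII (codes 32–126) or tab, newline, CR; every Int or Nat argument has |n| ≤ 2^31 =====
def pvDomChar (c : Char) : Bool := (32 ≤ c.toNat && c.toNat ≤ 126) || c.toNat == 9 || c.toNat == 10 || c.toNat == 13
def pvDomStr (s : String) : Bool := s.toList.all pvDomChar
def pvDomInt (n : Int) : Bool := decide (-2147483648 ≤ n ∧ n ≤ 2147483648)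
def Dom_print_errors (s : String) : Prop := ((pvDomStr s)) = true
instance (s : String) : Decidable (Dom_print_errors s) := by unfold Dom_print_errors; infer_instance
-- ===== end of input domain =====

-- B counts via a frequency table summed over the 13 target letters; A scans s testing membership.

-- ===== PORT A =====
def print_errors (s : String) : String :=
  let alphabet : List Char := "abcdefghijklmnopqrstuvwxyz".toList
  let denominator : Int := PySem.Str.len s
  let numerator : Int :=
    s.toList.foldl (fun n letter =>
      if letter ∈ PySem.List.slice alphabet (some 13) none then n + 1 else n) 0
  PySem.Int.toStr numerator ++ "/" ++ PySem.Int.toStr denominator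

-- ===== PORT B =====
def print_errors_alt (s : String) : String :=
  let counts : PySem.Dict Char Int :=
    s.toList.foldl (fun d ch => d.insert ch (d.getD ch 0 + 1)) PySem.Dict.empty
  let targets : List Char := PySem.List.slice "abcdefghijklmnopqrstuvwxyz".toList (some 13) none
  let numerator : Int := targets.foldl (fun acc c => acc + counts.getD c 0) 0
  PySem.Int.toStr numerator ++ "/" ++ PySem.Int.toStr (PySem.Str.len s)

-- ===== PRECONDITION & SPEC =====
def Spec_print_errors (s : String) (out : String) : Prop := out = print_errors_alt s
instance (s : String) (out : String) : Decidable (Spec_print_errors s out) := by unfold Spec_print_errors; infer_instance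

-- ===== CLAIM (what is proved, stated in full; the proofs are below) =====
def Claim_equal_print_errors : Prop := ∀ (s : String), Dom_print_errors s → Spec_print_errors s (print_errors s)

-- ===== LEMMAS AND PROOFS =====

-- counting members of a nodup list T one element at a time
theorem countP_cons_mem (c : Char) (T : List Char) (hc : c ∉ T) (l : List Char) :
    l.countP (fun x => decide (x = c) || decide (x ∈ T)) = l.count c + l.countP (fun x => decide (x ∈ T)) := by
  induction l with
  | nil => simp
  | cons x l ih =>
    simp only [List.countP_cons, List.count_cons, ih]
    by_cases hxc : x = c <;> by_cases hxT : x ∈ T <;>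
      simp_all <;> omega

theorem sum_count_eq_countP (T : List Char) (hT : T.Nodup) (l : List Char) :
    (T.map (fun c => l.count c)).sum = l.countP (fun x => decide (x ∈ T)) := by
  induction T with
  | nil => simp
  | cons c T ih =>
    rcases List.nodup_cons.mp hT with ⟨hc, hT'⟩
    simp only [List.map_cons, List.sum_cons, ih hT', List.mem_cons]
    rw [← countP_cons_mem c T hc l]
    exact List.countP_congr (by intro x _; simp)

-- ===== VERDICT (by name: the statement is the Claim_ definition above) =====
theorem print_errors_spec : Claim_equal_print_errors := by
  intro s _
  unfold Spec_print_errors print_errors print_errors_alt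
  simp only [PySem.List.foldl_ite_add_one, PySem.List.foldl_add,
    PySem.Dict.getD_foldl_insert_add_one, PySem.Dict.getD_empty, zero_add]
  have hnodup : (PySem.List.slice "abcdefghijklmnopqrstuvwxyz".toList (some 13) none).Nodup := by
    decide
  rw [← sum_count_eq_countP _ hnodup s.toList]
  push_cast
  rfl
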